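-- pv_equiv track=rewrite | github.com/sonicpose/square_free_words_morphisms | sfwords.py | cyclicLexLeast
-- ===== SOURCE A (Python) =====
-- def isSquare(l):
--     return l[:len(l)//2] == l[len(l)//2:]
--
-- def notSquareEnd(l):
--     for i in range(len(l)):
--         if isSquare(l[len(l)-i-1:]):
--             return False
--     return True
--
-- def cyclicLexLeast(prefix, size, mod):
--     L = prefix.copy()
--     for i in range(size):
--         for j in range(mod):
--             if notSquareEnd(L + [(L[-1] + j)%mod]):
--                 L += [(L[-1] + j)%mod]
--                 break
--             if j == mod-1:
--                 return L
--     return L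
-- ===== SOURCE B (Python) =====
-- def cyclicLexLeast(prefix, size, mod):
--     # Instead of testing every candidate letter for a square suffix, compute once per
--     # step the set of letters that would CLOSE a square: appending v to L (length m)
--     # creates a square suffix of length 2*t iff the two halves already agree on L
--     # (t-1 comparisons) and v == L[m-t].  Then pick the first j whose letter avoids it.
--     L = list(prefix)
--     for _ in range(size):
--         m = len(L)
--         forbidden = set()
--         for t in range(1, (m + 1) // 2 + 1):
--             if all(L[m + 1 - 2*t + i] == L[m + 1 - t + i] for i in range(t - 1)):
--                 forbidden.add(L[m - t])
--         for j in range(mod):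
--             v = (L[-1] + j) % mod
--             if v not in forbidden:
--                 L.append(v)
--                 break
--         else:
--             return L
--     return L
-- ===== Notes on version B (the rewrite author's own statement) =====
-- stated objective: alternative
-- what changed: B inverts the test: instead of checking every candidate letter for a square suffix, it computes once per step the set of letters that would close a square (v closes a square of length 2t iff the two halves already agree on L and v equals L[m-t]) and then picks the first candidate outside that set, so the per-candidate suffix scan disappears.
import Mathlib
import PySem

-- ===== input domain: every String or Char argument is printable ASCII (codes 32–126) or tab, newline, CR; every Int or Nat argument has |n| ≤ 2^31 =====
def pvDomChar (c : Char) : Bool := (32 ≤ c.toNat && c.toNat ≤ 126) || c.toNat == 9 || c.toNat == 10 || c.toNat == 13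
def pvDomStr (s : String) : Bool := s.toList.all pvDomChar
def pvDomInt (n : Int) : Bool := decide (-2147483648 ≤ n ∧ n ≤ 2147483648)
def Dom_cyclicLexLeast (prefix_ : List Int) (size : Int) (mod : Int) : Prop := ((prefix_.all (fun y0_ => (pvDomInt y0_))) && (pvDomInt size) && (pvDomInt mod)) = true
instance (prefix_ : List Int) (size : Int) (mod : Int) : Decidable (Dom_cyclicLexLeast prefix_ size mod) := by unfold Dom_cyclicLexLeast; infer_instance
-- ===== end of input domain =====

-- B inverts A's test: instead of checking each candidate letter for a square suffix, it
-- computes once per step the set of letters that would close a square and picks the first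
-- candidate outside it (the per-candidate suffix scan disappears); objective: alternative.

-- ===== PORT A =====
-- isSquare(l): l[:len(l)//2] == l[len(l)//2:]
def isSquareA (l : List Int) : Bool :=
  PySem.List.slice l none (some (PySem.Int.floordiv (l.length : Int) 2)) ==
  PySem.List.slice l (some (PySem.Int.floordiv (l.length : Int) 2)) none

-- notSquareEnd(l): for i in range(len(l)): if isSquare(l[len(l)-i-1:]): return False; return True
def notSquareEnd (l : List Int) : Bool :=
  (PySem.List.pyRange 0 (l.length : Int) 1).all
    (fun i => !isSquareA (PySem.List.slice l (some ((l.length : Int) - i - 1)) none))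

-- the inner 'for j in range(mod)' loop, lazily like Python's range (fuel = number of
-- remaining values, j = the current value): Sum.inl L' = loop finished, continue with L',
-- Sum.inr L = 'return L' fired (the 'if j == mod-1' branch, or IndexError on L[-1], excluded by Pre_)
def innerA (l : List Int) (mod : Int) : Nat → Int → (List Int ⊕ List Int)
  | 0, _ => Sum.inl l
  | fuel+1, j =>
    match PySem.List.pyGet? l (-1) with
    | none => Sum.inr l  -- Python raises IndexError here (empty L); B's port does the same 'return L'
    | some last =>
      let c := PySem.Int.mod (last + j) mod
      if notSquareEnd (l ++ [c]) then Sum.inl (l ++ [c])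
      else if j == mod - 1 then Sum.inr l
      else innerA l mod fuel (j+1)

-- the outer 'for i in range(size)' loop
def outerA (mod : Int) : Nat → List Int → List Int
  | 0, l => l
  | n+1, l =>
    match innerA l mod mod.toNat 0 with
    | Sum.inl l' => outerA mod n l'
    | Sum.inr r => r

def cyclicLexLeast (prefix_ : List Int) (size : Int) (mod : Int) : List Int :=
  outerA mod size.toNat prefix_

-- ===== PORT B =====
-- forbidden = set(); for t in range(1,(m+1)//2+1): if all(L[m+1-2t+i]==L[m+1-t+i] for i in range(t-1)): forbidden.add(L[m-t])
def forbiddenB (l : List Int) : PySem.Set Int :=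
  (List.range' 1 ((l.length + 1) / 2)).foldl
    (fun s t =>
      if (List.range (t-1)).all
           (fun i => l.getD (l.length + 1 - 2*t + i) 0 == l.getD (l.length + 1 - t + i) 0)
      then PySem.Set.add s (l.getD (l.length - t) 0) else s)
    PySem.Set.empty

-- for j in range(mod): v=(L[-1]+j)%mod; if v not in forbidden: append v, break — lazily,
-- fuel = remaining range values; none = the loop's else: clause fires ('return L')
def findJB (l : List Int) (mod : Int) (forb : PySem.Set Int) : Nat → Int → Option Int
  | 0, _ => none
  | fuel+1, j =>
    match PySem.List.pyGet? l (-1) with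
    | none => none  -- Python raises IndexError here (empty L); falls back to 'return L' like A's port
    | some last =>
      let v := PySem.Int.mod (last + j) mod
      if !(PySem.Set.contains forb v) then some v
      else findJB l mod forb fuel (j+1)

def loopB (mod : Int) : Nat → List Int → List Int
  | 0, l => l
  | n+1, l =>
    match findJB l mod (forbiddenB l) mod.toNat 0 with
    | none => l
    | some v => loopB mod n (l ++ [v])

def cyclicLexLeast_alt (prefix_ : List Int) (size : Int) (mod : Int) : List Int :=
  loopB mod size.toNat prefix_

-- ===== PRECONDITION & SPEC =====
-- Pre_ excludes exactly the inputs where Python A (and B alike) raises IndexError: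
-- an empty prefix with size > 0 and mod > 0 (both then evaluate L[-1] on an empty list).
def Pre_cyclicLexLeast (prefix_ : List Int) (size : Int) (mod : Int) : Prop :=
  prefix_ ≠ [] ∨ size ≤ 0 ∨ mod ≤ 0
instance (prefix_ : List Int) (size : Int) (mod : Int) : Decidable (Pre_cyclicLexLeast prefix_ size mod) := by unfold Pre_cyclicLexLeast; infer_instance

def pvWitness_cyclicLexLeast : List Int × Int × Int := ([0], 6, 3)

def Spec_cyclicLexLeast (prefix_ : List Int) (size : Int) (mod : Int) (out : List Int) : Prop := out = cyclicLexLeast_alt prefix_ size mod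
instance (prefix_ : List Int) (size : Int) (mod : Int) (out : List Int) : Decidable (Spec_cyclicLexLeast prefix_ size mod out) := by unfold Spec_cyclicLexLeast; infer_instance

-- ===== CLAIM (what is proved, stated in full; the proofs are below) =====
def Claim_equal_cyclicLexLeast : Prop := ∀ (prefix_ : List Int) (size : Int) (mod : Int), Dom_cyclicLexLeast prefix_ size mod → Pre_cyclicLexLeast prefix_ size mod → Spec_cyclicLexLeast prefix_ size mod (cyclicLexLeast prefix_ size mod)

-- ===== LEMMAS AND PROOFS =====

-- A's isSquare holds exactly on even-length lists whose two halves agree.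
lemma isSquareA_iff (s : List Int) :
    isSquareA s = true ↔ ∃ t : Nat, s.length = 2 * t ∧ s.take t = s.drop t := by
  unfold isSquareA
  rw [show PySem.Int.floordiv (s.length : Int) 2 = ((s.length / 2 : Nat) : Int) by
        exact_mod_cast PySem.Int.floordiv_natCast s.length 2,
      PySem.List.slice_to_natCast, PySem.List.slice_from_natCast, beq_iff_eq]
  constructor
  · intro h
    have hlen := congrArg List.length h
    simp [List.length_take, List.length_drop] at hlen
    exact ⟨s.length / 2, by omega, h⟩
  · rintro ⟨t, ht, h⟩
    have : s.length / 2 = t := by omega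
    rw [this]; exact h

-- A's detector, characterised: only even-length suffixes can be squares.
lemma notSq_iff (l : List Int) :
    notSquareEnd l = true ↔
      ∀ t : Nat, 0 < t → 2 * t ≤ l.length →
        ¬ ((l.drop (l.length - 2 * t)).take t = (l.drop (l.length - 2 * t)).drop t) := by
  unfold notSquareEnd
  rw [PySem.List.pyRange_one]
  simp only [List.all_map, List.all_eq_true, List.mem_range, Int.sub_zero, Int.toNat_natCast,
    Function.comp, zero_add, Bool.not_eq_eq_eq_not, Bool.not_true]
  have hslice : ∀ k : Nat, k < l.length →
      PySem.List.slice l (some ((l.length : Int) - (k : Int) - 1)) none = l.drop (l.length - 1 - k) := by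
    intro k hk
    rw [show (l.length : Int) - (k : Int) - 1 = ((l.length - 1 - k : Nat) : Int) by omega,
      PySem.List.slice_from_natCast]
  constructor
  · intro H t ht h2t hsq
    have hk : 2*t - 1 < l.length := by omega
    have := H (2*t-1) hk
    rw [hslice _ hk] at this
    rw [show l.length - 1 - (2*t-1) = l.length - 2*t by omega] at this
    have : isSquareA (l.drop (l.length - 2*t)) = true :=
      (isSquareA_iff _).mpr ⟨t, by rw [List.length_drop]; omega, hsq⟩
    simp_all
  · intro H k hk
    rw [hslice k hk]
    cases hb : isSquareA (l.drop (l.length - 1 - k)) with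
    | false => rfl
    | true =>
    exfalso
    rcases (isSquareA_iff _).mp hb with ⟨t, hlen, heq⟩
    rw [List.length_drop] at hlen
    have ht : 0 < t := by omega
    have h2t : 2*t ≤ l.length := by omega
    have := H t ht h2t
    rw [show l.length - 2*t = l.length - 1 - k by omega] at this
    exact this heq

-- appending v to l closes a square of half-length t iff B's t-condition holds and v = l[m-t]
lemma close_sq_iff (l : List Int) (v : Int) (t : Nat) (ht : 0 < t) (h2 : 2*t ≤ l.length + 1) :
    (((l ++ [v]).drop ((l ++ [v]).length - 2*t)).take t
       = ((l ++ [v]).drop ((l ++ [v]).length - 2*t)).drop t) ↔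
    ((∀ i < t-1, l.getD (l.length+1-2*t+i) 0 = l.getD (l.length+1-t+i) 0)
       ∧ v = l.getD (l.length - t) 0) := by
  have hl' : (l ++ [v]).length = l.length + 1 := by simp
  have hget : ∀ k : Nat, k < l.length → (l ++ [v]).getD k 0 = l.getD k 0 := by
    intro k hk
    simp [List.getD_eq_getElem?_getD, List.getElem?_append_left hk]
  have hgetv : (l ++ [v]).getD l.length 0 = v := by
    simp [List.getD_eq_getElem?_getD]
  have hpt : (((l ++ [v]).drop ((l ++ [v]).length - 2*t)).take t
       = ((l ++ [v]).drop ((l ++ [v]).length - 2*t)).drop t) ↔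
      ∀ i < t, (l ++ [v]).getD (l.length+1-2*t+i) 0 = (l ++ [v]).getD (l.length+1-t+i) 0 := by
    rw [hl']
    constructor
    · intro h i hi
      have := congrArg (fun s => s.getD i 0) h
      simp only [List.getD_eq_getElem?_getD, List.getElem?_take, List.getElem?_drop] at this ⊢
      rw [if_pos hi] at this
      rw [show l.length + 1 - 2*t + (t + i) = l.length + 1 - t + i by omega] at this
      exact this
    · intro h
      apply List.ext_getElem?
      intro j
      by_cases hj : j < t
      · have := h j hj
        simp only [List.getD_eq_getElem?_getD, List.getElem?_take, List.getElem?_drop] at this ⊢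
        rw [if_pos hj]
        rw [show l.length + 1 - 2*t + (t + j) = l.length + 1 - t + j by omega]
        have h1 : l.length + 1 - 2*t + j < (l ++ [v]).length := by rw [hl']; omega
        have h2' : l.length + 1 - t + j < (l ++ [v]).length := by rw [hl']; omega
        rw [List.getElem?_eq_getElem h1, List.getElem?_eq_getElem h2'] at this ⊢
        simp only [Option.getD_some] at this
        exact congrArg some this
      · simp only [List.getElem?_take, List.getElem?_drop, if_neg hj]
        rw [List.getElem?_eq_none (by simp; omega)]
  rw [hpt]
  constructor
  · intro h
    constructor
    · intro i hi
      have := h i (by omega)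
      rw [hget _ (by omega), hget _ (by omega)] at this
      exact this
    · have := h (t-1) (by omega)
      rw [show l.length + 1 - 2*t + (t-1) = l.length - t by omega,
          show l.length + 1 - t + (t-1) = l.length by omega,
          hget _ (by omega), hgetv] at this
      exact this.symm
  · rintro ⟨h, hv⟩ i hi
    by_cases hlast : i = t - 1
    · subst hlast
      rw [show l.length + 1 - 2*t + (t-1) = l.length - t by omega,
          show l.length + 1 - t + (t-1) = l.length by omega,
          hget _ (by omega), hgetv]
      exact hv.symm
    · have hi' : i < t - 1 := by omega
      rw [hget _ (by omega), hget _ (by omega)]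
      exact h i hi'

-- membership in B's forbidden set, characterised
lemma mem_forbiddenB (l : List Int) (v : Int) :
    v ∈ forbiddenB l ↔
      ∃ t : Nat, 0 < t ∧ 2*t ≤ l.length + 1 ∧
        (∀ i < t-1, l.getD (l.length+1-2*t+i) 0 = l.getD (l.length+1-t+i) 0)
        ∧ v = l.getD (l.length - t) 0 := by
  unfold forbiddenB
  have gen : ∀ (ts : List Nat) (s : PySem.Set Int),
      v ∈ ts.foldl
        (fun s t =>
          if (List.range (t-1)).all
               (fun i => l.getD (l.length + 1 - 2*t + i) 0 == l.getD (l.length + 1 - t + i) 0)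
          then PySem.Set.add s (l.getD (l.length - t) 0) else s) s ↔
      v ∈ s ∨ ∃ t ∈ ts,
        (∀ i < t-1, l.getD (l.length+1-2*t+i) 0 = l.getD (l.length+1-t+i) 0)
        ∧ v = l.getD (l.length - t) 0 := by
    intro ts
    induction ts with
    | nil => simp
    | cons t ts ih =>
      intro s
      simp only [List.foldl_cons]
      by_cases hc : (List.range (t-1)).all
          (fun i => l.getD (l.length + 1 - 2*t + i) 0 == l.getD (l.length + 1 - t + i) 0) = true
      · rw [if_pos hc, ih, PySem.Set.mem_add]
        simp only [List.all_eq_true, List.mem_range, beq_iff_eq] at hc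
        constructor
        · rintro (⟨h | h⟩ | ⟨t', ht', h⟩)
          · exact Or.inl h
          · exact Or.inr ⟨t, List.mem_cons_self, hc, h⟩
          · exact Or.inr ⟨t', List.mem_cons_of_mem _ ht', h⟩
        · rintro (h | ⟨t', ht', hcond, hv⟩)
          · exact Or.inl (Or.inl h)
          · rcases List.mem_cons.mp ht' with rfl | ht''
            · exact Or.inl (Or.inr hv)
            · exact Or.inr ⟨t', ht'', hcond, hv⟩
      · rw [if_neg hc, ih]
        simp only [List.all_eq_true, List.mem_range, beq_iff_eq] at hc
        push Not at hc
        constructor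
        · rintro (h | ⟨t', ht', hcond, hv⟩)
          · exact Or.inl h
          · exact Or.inr ⟨t', List.mem_cons_of_mem _ ht', hcond, hv⟩
        · rintro (h | ⟨t', ht', hcond, hv⟩)
          · exact Or.inl h
          · rcases List.mem_cons.mp ht' with rfl | ht''
            · exact absurd (fun i hi => hcond i hi) (by
                rcases hc with ⟨i, hi, hne⟩
                intro hall
                exact hne (hall i hi))
            · exact Or.inr ⟨t', ht'', hcond, hv⟩
  rw [gen]
  simp only [PySem.Set.empty, List.not_mem_nil, false_or, List.mem_range'_1]
  constructor
  · rintro ⟨t, ⟨h1, h2⟩, hcond, hv⟩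
    refine ⟨t, by omega, ?_, hcond, hv⟩
    have := (Nat.le_div_iff_mul_le (k := 2) (by norm_num)).mp (by omega : t ≤ (l.length + 1) / 2)
    omega
  · rintro ⟨t, h1, h2, hcond, hv⟩
    refine ⟨t, ⟨by omega, ?_⟩, hcond, hv⟩
    have := (Nat.le_div_iff_mul_le (k := 2) (by norm_num)).mpr (by omega : t * 2 ≤ l.length + 1)
    omega

-- the key fact: A's per-candidate square test is membership in B's forbidden set
lemma notSquareEnd_eq_forbidden (l : List Int) (v : Int) :
    notSquareEnd (l ++ [v]) = !(PySem.Set.contains (forbiddenB l) v) := by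
  cases hc : PySem.Set.contains (forbiddenB l) v with
  | true =>
    rcases (mem_forbiddenB l v).mp ((PySem.Set.contains_iff _ _).mp hc) with ⟨t, ht, h2, hcond, hv⟩
    cases hn : notSquareEnd (l ++ [v]) with
    | false => rfl
    | true =>
      exfalso
      have := (notSq_iff (l ++ [v])).mp hn t ht (by simp; omega)
      exact this ((close_sq_iff l v t ht h2).mpr ⟨hcond, hv⟩)
  | false =>
    simp only [Bool.not_false]
    rw [notSq_iff]
    intro t ht h2t hsq
    have h2 : 2*t ≤ l.length + 1 := by simpa using h2t
    have : v ∈ forbiddenB l := by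
      rcases (close_sq_iff l v t ht h2).mp hsq with ⟨hcond, hv⟩
      exact (mem_forbiddenB l v).mpr ⟨t, ht, h2, hcond, hv⟩
    rw [← PySem.Set.contains_iff] at this
    rw [hc] at this
    exact Bool.false_ne_true this

-- A's inner candidate loop computes B's find-first-outside-forbidden loop
lemma inner_eq (l : List Int) (mod : Int) : ∀ (fuel : Nat) (j0 : Int), (mod - j0).toNat = fuel →
    innerA l mod fuel j0 =
      match findJB l mod (forbiddenB l) fuel j0 with
      | some c => Sum.inl (l ++ [c])
      | none => if j0 < mod then Sum.inr l else Sum.inl l := by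
  intro fuel
  induction fuel with
  | zero =>
    intro j0 hk
    simp [innerA, findJB, if_neg (by omega : ¬ j0 < mod)]
  | succ fuel ih =>
    intro j0 hk
    have hj : j0 < mod := by omega
    cases hg : PySem.List.pyGet? l (-1) with
    | none => simp [innerA, findJB, hg, if_pos hj]
    | some last =>
      simp only [innerA, findJB, hg, notSquareEnd_eq_forbidden]
      cases hs : PySem.Set.contains (forbiddenB l) (PySem.Int.mod (last + j0) mod) with
      | false => simp
      | true =>
        simp only [Bool.not_true, if_neg (by simp : ¬ (false = true))]
        by_cases hlast : j0 = mod - 1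
        · have hz : fuel = 0 := by omega
          simp [hlast, hz, findJB]
        · have hne : ¬ ((j0 == mod - 1) = true) := by simp [hlast]
          rw [if_neg hne, ih (j0+1) (by omega)]
          have hlt : j0 + 1 < mod := by omega
          simp [if_pos hlt, if_pos hj]

-- with mod ≤ 0 the inner range is empty and A's outer loop never changes L
lemma outerA_of_nonpos (mod : Int) (hm : mod ≤ 0) : ∀ (n : Nat) (l : List Int), outerA mod n l = l := by
  intro n
  induction n with
  | zero => intro l; rfl
  | succ n ih =>
    intro l
    rw [show outerA mod (n+1) l = match innerA l mod mod.toNat 0 with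
      | Sum.inl l' => outerA mod n l' | Sum.inr r => r from rfl]
    rw [show mod.toNat = 0 by omega]
    simp [innerA, ih]

-- the two loops agree step for step
lemma loop_eq (mod : Int) : ∀ (n : Nat) (l : List Int), outerA mod n l = loopB mod n l := by
  intro n
  induction n with
  | zero => intro l; rfl
  | succ n ih =>
    intro l
    rw [show loopB mod (n+1) l = match findJB l mod (forbiddenB l) mod.toNat 0 with
      | none => l | some v => loopB mod n (l ++ [v]) from rfl]
    by_cases hm : mod ≤ 0
    · rw [outerA_of_nonpos mod hm]
      rw [show mod.toNat = 0 by omega]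
      rfl
    · have hm' : 0 < mod := by omega
      rw [show outerA mod (n+1) l = match innerA l mod mod.toNat 0 with
        | Sum.inl l' => outerA mod n l' | Sum.inr r => r from rfl]
      rw [inner_eq l mod mod.toNat 0 (by omega)]
      cases hf : findJB l mod (forbiddenB l) mod.toNat 0 with
      | none => simp [if_pos hm']
      | some c => simp [ih]

-- ===== VERDICT (by name: the statement is the Claim_ definition above) =====
theorem cyclicLexLeast_spec : Claim_equal_cyclicLexLeast := by
  intro prefix_ size mod _ _
  unfold Spec_cyclicLexLeast cyclicLexLeast cyclicLexLeast_alt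
  exact loop_eq mod size.toNat prefix_
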